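-- pv_equiv track=rewrite | github.com/Embi/euler | problems/problem_051/solution.py | is_mask_equal
-- ===== SOURCE A (Python) =====
-- from typing import List, Tuple, Iterable
--
-- def is_mask_equal(number: int, mask: List[int]):
--     """ Check if the masked digits are all equal
--     """
--     if len(mask) ==  1:
--         return True
--     number = str(number)
--     masked_digit = None
--     for idx, digit in enumerate(number):
--         if idx in mask:
--             if masked_digit is None:
--                 masked_digit = number[idx]
--             if number[idx] != masked_digit:
--                 return False
--     return True
-- ===== SOURCE B (Python) =====
-- def is_mask_equal(number, mask):
--     s = str(number)
--     digits = [s[i] for i in mask if 0 <= i < len(s)]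
--     return len(set(digits)) <= 1
-- ===== Notes on version B (the rewrite author's own statement) =====
-- stated objective: simpler
-- what changed: B indexes the string directly at the mask positions and tests all-equal via set uniqueness (len(set)<=1), instead of A's scan over every digit with an 'idx in mask' membership test, a masked_digit accumulator and early return; A's len(mask)==1 special case falls out naturally.
import Mathlib
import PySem

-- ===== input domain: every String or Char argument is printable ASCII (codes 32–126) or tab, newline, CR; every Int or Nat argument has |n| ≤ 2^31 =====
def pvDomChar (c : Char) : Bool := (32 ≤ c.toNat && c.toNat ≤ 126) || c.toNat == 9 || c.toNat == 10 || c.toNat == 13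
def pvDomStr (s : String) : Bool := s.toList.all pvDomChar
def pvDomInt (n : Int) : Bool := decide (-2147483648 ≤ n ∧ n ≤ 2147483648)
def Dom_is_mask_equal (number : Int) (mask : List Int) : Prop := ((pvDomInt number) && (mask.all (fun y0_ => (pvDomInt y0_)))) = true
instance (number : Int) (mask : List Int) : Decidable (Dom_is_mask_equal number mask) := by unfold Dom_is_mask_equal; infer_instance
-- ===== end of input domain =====

-- B gathers the masked characters by direct indexed lookup over the mask and tests all-equal
-- via set uniqueness, replacing A's scan over every digit with a membership test and a
-- first-mismatch accumulator (objective: simpler; no speed claim).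

-- ===== PORT A =====
-- the for-loop over enumerate(number) with the masked_digit accumulator and early return False
def isMaskLoop (chars : List Char) (mask : List Int) : List (Int × Char) → Option Char → Bool
  | [], _ => true
  | (idx, _) :: rest, md =>
    if idx ∈ mask then
      match PySem.List.pyGet? chars idx with
      | none => false   -- unreachable: indices from enumerate are in range (Python would raise)
      | some c =>
        let md' := md.getD c          -- if masked_digit is None: masked_digit = number[idx]
        if c ≠ md' then false         -- if number[idx] != masked_digit: return False
        else isMaskLoop chars mask rest (some md')
    else isMaskLoop chars mask rest md

def is_mask_equal (number : Int) (mask : List Int) : Bool :=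
  if mask.length == 1 then true
  else
    let s := PySem.Int.toChars number
    isMaskLoop s mask (PySem.List.enumerate s) none

-- ===== PORT B =====
def is_mask_equal_alt (number : Int) (mask : List Int) : Bool :=
  let s := PySem.Int.toChars number
  let digits := mask.filterMap (fun i =>
    if 0 ≤ i ∧ i < (s.length : Int) then PySem.List.pyGet? s i else none)
  decide ((PySem.Set.ofList digits).length ≤ 1)

-- ===== PRECONDITION & SPEC =====
def Spec_is_mask_equal (number : Int) (mask : List Int) (out : Bool) : Prop := out = is_mask_equal_alt number mask
instance (number : Int) (mask : List Int) (out : Bool) : Decidable (Spec_is_mask_equal number mask out) := by unfold Spec_is_mask_equal; infer_instance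

-- ===== CLAIM (what is proved, stated in full; the proofs are below) =====
def Claim_equal_is_mask_equal : Prop := ∀ (number : Int) (mask : List Int), Dom_is_mask_equal number mask → Spec_is_mask_equal number mask (is_mask_equal number mask)

-- ===== LEMMAS AND PROOFS =====

-- the masked characters of an enumerated segment, in order
def maskedOf (mask : List Int) (l : List (Int × Char)) : List Char :=
  l.filterMap (fun p => if p.1 ∈ mask then some p.2 else none)

theorem maskedOf_nil (mask : List Int) : maskedOf mask [] = [] := rfl

theorem maskedOf_cons (mask : List Int) (p : Int × Char) (l : List (Int × Char)) :
    maskedOf mask (p :: l) =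
      (if p.1 ∈ mask then p.2 :: maskedOf mask l else maskedOf mask l) := by
  by_cases h : p.1 ∈ mask <;> simp [maskedOf, h]

theorem loop_some (chars : List Char) (mask : List Int) (l : List (Int × Char)) (x : Char)
    (h : ∀ p ∈ l, PySem.List.pyGet? chars p.1 = some p.2) :
    (isMaskLoop chars mask l (some x) = true ↔ ∀ c ∈ maskedOf mask l, c = x) := by
  induction l with
  | nil => simp [isMaskLoop, maskedOf_nil]
  | cons p rest ih =>
    obtain ⟨idx, d⟩ := p
    have hp := h (idx, d) (List.mem_cons_self)
    have ih' := ih (fun q hq => h q (List.mem_cons_of_mem _ hq))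
    rw [maskedOf_cons]
    by_cases hm : idx ∈ mask
    · simp only [isMaskLoop, if_pos hm, hp, Option.getD_some]
      by_cases hdx : d = x
      · subst hdx; simp [ih']
      · simp [hdx]
    · simp only [isMaskLoop, if_neg hm]
      exact ih'

theorem loop_none (chars : List Char) (mask : List Int) (l : List (Int × Char))
    (h : ∀ p ∈ l, PySem.List.pyGet? chars p.1 = some p.2) :
    (isMaskLoop chars mask l none = true ↔
      ∀ c ∈ maskedOf mask l, ∀ c' ∈ maskedOf mask l, c = c') := by
  induction l with
  | nil => simp [isMaskLoop, maskedOf_nil]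
  | cons p rest ih =>
    obtain ⟨idx, d⟩ := p
    have hp := h (idx, d) (List.mem_cons_self)
    have ih' := ih (fun q hq => h q (List.mem_cons_of_mem _ hq))
    rw [maskedOf_cons]
    by_cases hm : idx ∈ mask
    · simp only [isMaskLoop, if_pos hm, hp, Option.getD_none, ne_eq, not_true_eq_false,
        if_false]
      rw [loop_some chars mask rest d (fun q hq => h q (List.mem_cons_of_mem _ hq))]
      constructor
      · intro hall c hc c' hc'
        rcases List.mem_cons.mp hc with h1 | h1
        · rcases List.mem_cons.mp hc' with h2 | h2
          · rw [h1, h2]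
          · rw [h1, hall c' h2]
        · rcases List.mem_cons.mp hc' with h2 | h2
          · rw [hall c h1, h2]
          · rw [hall c h1, hall c' h2]
      · intro hall c hc
        exact hall c (List.mem_cons_of_mem _ hc) d (List.mem_cons_self)
    · simp only [isMaskLoop, if_neg hm]
      exact ih'

theorem enum_get (chars : List Char) :
    ∀ p ∈ PySem.List.enumerate chars, PySem.List.pyGet? chars p.1 = some p.2 := by
  intro p hp
  rw [PySem.List.mem_enumerate_iff] at hp
  obtain ⟨k, hk, rfl⟩ := hp
  simp [PySem.List.pyGet?_natCast, List.getElem?_eq_getElem hk]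

-- set uniqueness test ↔ all elements pairwise equal
theorem ofList_len_le_one (xs : List Char) :
    ((PySem.Set.ofList xs).length ≤ 1 ↔ ∀ c ∈ xs, ∀ c' ∈ xs, c = c') := by
  constructor
  · intro hlen c hc c' hc'
    have hc1 : c ∈ PySem.Set.ofList xs := (PySem.Set.mem_ofList xs c).mpr hc
    have hc2 : c' ∈ PySem.Set.ofList xs := (PySem.Set.mem_ofList xs c').mpr hc'
    rcases hset : PySem.Set.ofList xs with _ | ⟨a, _ | ⟨b, t⟩⟩
    · rw [hset] at hc1; simp at hc1
    · rw [hset] at hc1 hc2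
      simp at hc1 hc2
      rw [hc1, hc2]
    · rw [hset] at hlen; simp at hlen
  · intro hall
    have hnd := PySem.Set.nodup_ofList (xs := xs)
    rcases hset : PySem.Set.ofList xs with _ | ⟨a, _ | ⟨b, t⟩⟩
    · simp
    · simp
    · exfalso
      rw [hset] at hnd
      have ha : a ∈ xs := (PySem.Set.mem_ofList xs a).mp (hset ▸ List.mem_cons_self)
      have hb : b ∈ xs := (PySem.Set.mem_ofList xs b).mp
        (hset ▸ List.mem_cons_of_mem _ (List.mem_cons_self))
      have hab : a = b := hall a ha b hb
      exact (List.nodup_cons.mp hnd).1 (hab ▸ List.mem_cons_self)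

-- membership in B's gathered digits = membership in A's masked characters
theorem mem_digits_iff (chars : List Char) (mask : List Int) (c : Char) :
    (c ∈ mask.filterMap (fun i =>
        if 0 ≤ i ∧ i < (chars.length : Int) then PySem.List.pyGet? chars i else none) ↔
     c ∈ maskedOf mask (PySem.List.enumerate chars)) := by
  rw [List.mem_filterMap]
  unfold maskedOf
  rw [List.mem_filterMap]
  constructor
  · rintro ⟨i, hi, hsome⟩
    by_cases hr : 0 ≤ i ∧ i < (chars.length : Int)
    · rw [if_pos hr, PySem.List.pyGet?_of_nonneg chars hr.1] at hsome
      have hk : i.toNat < chars.length := by omega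
      rw [List.getElem?_eq_getElem hk] at hsome
      refine ⟨((i.toNat : Int), c), ?_, ?_⟩
      · rw [PySem.List.mem_enumerate_iff]
        exact ⟨i.toNat, hk, by simp [← Option.some_inj.mp hsome]⟩
      · have hti : (i.toNat : Int) = i := by omega
        rw [hti]
        rw [if_pos hi]
    · rw [if_neg hr] at hsome; exact absurd hsome (by simp)
  · rintro ⟨p, hp, hsome⟩
    rw [PySem.List.mem_enumerate_iff] at hp
    obtain ⟨k, hk, rfl⟩ := hp
    simp only [zero_add] at hsome ⊢
    by_cases hm : (k : Int) ∈ mask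
    · rw [if_pos hm] at hsome
      refine ⟨(k : Int), hm, ?_⟩
      rw [if_pos (by constructor <;> omega)]
      rw [PySem.List.pyGet?_natCast, List.getElem?_eq_getElem hk,
        Option.some_inj.mp hsome]
    · rw [if_neg hm] at hsome; exact absurd hsome (by simp)

-- ===== VERDICT (by name: the statement is the Claim_ definition above) =====
theorem is_mask_equal_spec : Claim_equal_is_mask_equal := by
  intro number mask _
  unfold Spec_is_mask_equal is_mask_equal is_mask_equal_alt
  show (if mask.length == 1 then true
        else isMaskLoop (PySem.Int.toChars number) mask
          (PySem.List.enumerate (PySem.Int.toChars number)) none) =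
      decide ((PySem.Set.ofList (mask.filterMap (fun i =>
        if 0 ≤ i ∧ i < ((PySem.Int.toChars number).length : Int)
        then PySem.List.pyGet? (PySem.Int.toChars number) i else none))).length ≤ 1)
  by_cases h1 : mask.length = 1
  · rw [if_pos (by simpa using h1)]
    obtain ⟨i, rfl⟩ : ∃ i, mask = [i] := by
      match mask, h1 with | [i], _ => exact ⟨i, rfl⟩
    symm
    rw [decide_eq_true_iff, ofList_len_le_one]
    intro c hc c' hc'
    rw [List.filterMap_cons, List.filterMap_nil] at hc hc'
    cases hx : (if 0 ≤ i ∧ i < ((PySem.Int.toChars number).length : Int)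
        then PySem.List.pyGet? (PySem.Int.toChars number) i else none) with
    | none => rw [hx] at hc; simp at hc
    | some x =>
      rw [hx] at hc hc'
      simp at hc hc'
      rw [hc, hc']
  · rw [if_neg (by simpa using h1)]
    apply Bool.coe_iff_coe.mp
    rw [loop_none (PySem.Int.toChars number) mask _ (enum_get (PySem.Int.toChars number)),
      decide_eq_true_iff, ofList_len_le_one]
    constructor
    · intro hall c hc c' hc'
      exact hall c ((mem_digits_iff (PySem.Int.toChars number) mask c).mp hc) c' ((mem_digits_iff (PySem.Int.toChars number) mask c').mp hc')
    · intro hall c hc c' hc'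
      exact hall c ((mem_digits_iff (PySem.Int.toChars number) mask c).mpr hc) c' ((mem_digits_iff (PySem.Int.toChars number) mask c').mpr hc')
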